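-- pv_equiv track=rewrite | github.com/lukpausr/HKA_EKG_Signalverarbeitung | evaluation/eval.py | greedyMatchingAlgorithm
-- ===== SOURCE A (Python) =====
-- def greedyMatchingAlgorithm(onsets_true, onsets_pred, offsets_true, offsets_pred):
--     # Greedy matching algorithm to pair true and predicted onsets/offsets
--     matched_onsets = []
--     matched_offsets = []
--
--     # Match onsets
--     for true_onset in onsets_true:
--         if len(onsets_pred) == 0:
--             break
--         closest_pred = min(onsets_pred, key=lambda x: abs(x - true_onset))
--         matched_onsets.append((true_onset, closest_pred))
--         onsets_pred.remove(closest_pred)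
--
--     # Match offsets
--     for true_offset in offsets_true:
--         if len(offsets_pred) == 0:
--             break
--         closest_pred = min(offsets_pred, key=lambda x: abs(x - true_offset))
--         matched_offsets.append((true_offset, closest_pred))
--         offsets_pred.remove(closest_pred)
--
--     return matched_onsets, matched_offsets
-- ===== SOURCE B (Python) =====
-- import bisect
--
-- def _match(trues, preds):
--     # sorted distinct values + per-value FIFO queues of original indices
--     vals = sorted(set(preds))
--     idxs = {}
--     for i, v in enumerate(preds):
--         idxs.setdefault(v, []).append(i)
--     out = []
--     for t in trues:
--         if not vals:
--             break
--         j = bisect.bisect_left(vals, t)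
--         if j == 0:
--             cand = vals[0]
--         elif j == len(vals):
--             cand = vals[-1]
--         else:
--             lo = vals[j - 1]
--             hi = vals[j]
--             if t - lo < hi - t or (t - lo == hi - t and idxs[lo][0] < idxs[hi][0]):
--                 cand = lo
--             else:
--                 cand = hi
--         out.append((t, cand))
--         rem = idxs[cand]
--         rem.pop(0)
--         if not rem:
--             del idxs[cand]
--             vals.pop(bisect.bisect_left(vals, cand))
--     return out
--
-- def greedyMatchingAlgorithm(onsets_true, onsets_pred, offsets_true, offsets_pred):
--     return _match(onsets_true, onsets_pred), _match(offsets_true, offsets_pred)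
-- ===== Notes on version B (the rewrite author's own statement) =====
-- stated objective: faster
-- what changed: Replaces the per-true-value linear min-scan and list.remove over the remaining predictions with a sorted distinct-value array queried by bisect plus per-value FIFO queues of original indices (which also settle Python min's first-occurrence tie-break), removing the inner O(m) scan.
import Mathlib
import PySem

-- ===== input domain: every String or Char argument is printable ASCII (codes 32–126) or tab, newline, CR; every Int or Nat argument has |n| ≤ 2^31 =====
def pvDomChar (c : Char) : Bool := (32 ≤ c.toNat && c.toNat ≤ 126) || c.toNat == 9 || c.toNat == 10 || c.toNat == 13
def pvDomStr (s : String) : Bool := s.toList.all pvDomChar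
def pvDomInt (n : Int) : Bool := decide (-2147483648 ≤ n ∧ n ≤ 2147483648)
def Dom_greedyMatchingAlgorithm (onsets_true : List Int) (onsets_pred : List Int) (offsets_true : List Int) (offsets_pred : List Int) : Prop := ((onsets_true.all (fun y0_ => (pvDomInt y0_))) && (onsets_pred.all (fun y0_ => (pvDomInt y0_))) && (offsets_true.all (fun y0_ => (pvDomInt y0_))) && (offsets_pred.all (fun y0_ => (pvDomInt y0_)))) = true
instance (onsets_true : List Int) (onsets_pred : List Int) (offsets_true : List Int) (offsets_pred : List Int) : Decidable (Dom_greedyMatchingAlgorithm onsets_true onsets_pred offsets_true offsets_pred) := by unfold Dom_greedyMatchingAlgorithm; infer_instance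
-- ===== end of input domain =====

-- ===== PORT A =====
-- B changes only the algorithm (sorted values + bisect + per-value index queues instead of a
-- linear min-scan with list.remove); note: Python A mutates onsets_pred/offsets_pred in place
-- (remove), B does not — the equivalence proved here is about the RETURN value.

-- A's for-loop with break: state = accumulated matches, remaining predictions
def pvLoopA (trues : List Int) (acc : List (Int × Int)) (preds : List Int) : List (Int × Int) :=
  match trues with
  | [] => acc
  | t :: ts =>
    if preds.length = 0 then acc       -- break
    else
      match PySem.List.min? preds (fun x => |x - t|) with
      | none => acc                    -- unreachable: preds is nonempty here
      | some c => pvLoopA ts (acc ++ [(t, c)]) ((PySem.List.remove? preds c).getD preds)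

def greedyMatchingAlgorithm (onsets_true : List Int) (onsets_pred : List Int) (offsets_true : List Int) (offsets_pred : List Int) : (List (Int × Int)) × (List (Int × Int)) :=
  (pvLoopA onsets_true [] onsets_pred, pvLoopA offsets_true [] offsets_pred)

-- ===== PORT B =====
-- idxs = {}; for i, v in enumerate(preds): idxs.setdefault(v, []).append(i)
def pvBuildIdxs (preds : List Int) : PySem.Dict Int (List Int) :=
  (PySem.List.enumerate preds).foldl
    (fun d p => d.insert p.2 (((d.get? p.2).getD []) ++ [p.1])) ∅

-- the bisect-based candidate choice of Source B (indexing is in range whenever vals ≠ [] and the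
-- dict holds a nonempty queue for every member of vals, which the loop maintains)
def pvCand (vals : List Int) (idxs : PySem.Dict Int (List Int)) (t : Int) : Int :=
  let j := PySem.List.bisectLeft vals t
  if j = 0 then vals.getD 0 0                                    -- vals[0]
  else if j = vals.length then vals.getD (vals.length - 1) 0     -- vals[-1]
  else
    let lo := vals.getD (j - 1) 0
    let hi := vals.getD j 0
    if t - lo < hi - t ∨ (t - lo = hi - t ∧
        ((idxs.get? lo).getD []).getD 0 0 < ((idxs.get? hi).getD []).getD 0 0)
    then lo else hi

-- B's for-loop: state = sorted distinct remaining values, value → queue of original indices, output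
def pvLoopB (trues : List Int) (vals : List Int) (idxs : PySem.Dict Int (List Int)) (out : List (Int × Int)) : List (Int × Int) :=
  match trues with
  | [] => out
  | t :: ts =>
    if vals = [] then out              -- break
    else
      let cand := pvCand vals idxs t
      let rem := (idxs.get? cand).getD []
      let rem' := rem.drop 1           -- rem.pop(0); rem is nonempty on every reachable state
      if rem' = [] then
        pvLoopB ts (vals.eraseIdx (PySem.List.bisectLeft vals cand)) (idxs.erase cand) (out ++ [(t, cand)])
      else
        pvLoopB ts vals (idxs.insert cand rem') (out ++ [(t, cand)])

def greedyMatchingAlgorithm_alt (onsets_true : List Int) (onsets_pred : List Int) (offsets_true : List Int) (offsets_pred : List Int) : (List (Int × Int)) × (List (Int × Int)) :=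
  (pvLoopB onsets_true (PySem.List.sorted (PySem.Set.ofList onsets_pred) (fun x => x)) (pvBuildIdxs onsets_pred) [],
   pvLoopB offsets_true (PySem.List.sorted (PySem.Set.ofList offsets_pred) (fun x => x)) (pvBuildIdxs offsets_pred) [])

-- ===== PRECONDITION & SPEC =====
def Spec_greedyMatchingAlgorithm (onsets_true : List Int) (onsets_pred : List Int) (offsets_true : List Int) (offsets_pred : List Int) (out : (List (Int × Int)) × (List (Int × Int))) : Prop := out = greedyMatchingAlgorithm_alt onsets_true onsets_pred offsets_true offsets_pred
instance (onsets_true : List Int) (onsets_pred : List Int) (offsets_true : List Int) (offsets_pred : List Int) (out : (List (Int × Int)) × (List (Int × Int))) : Decidable (Spec_greedyMatchingAlgorithm onsets_true onsets_pred offsets_true offsets_pred out) := by unfold Spec_greedyMatchingAlgorithm; infer_instance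

-- ===== CLAIM (what is proved, stated in full; the proofs are below) =====
def Claim_equal_greedyMatchingAlgorithm : Prop := ∀ (onsets_true : List Int) (onsets_pred : List Int) (offsets_true : List Int) (offsets_pred : List Int), Dom_greedyMatchingAlgorithm onsets_true onsets_pred offsets_true offsets_pred → Spec_greedyMatchingAlgorithm onsets_true onsets_pred offsets_true offsets_pred (greedyMatchingAlgorithm onsets_true onsets_pred offsets_true offsets_pred)

-- ===== LEMMAS AND PROOFS =====

-- index queue of value v: the original indices of the remaining pairs carrying value v
def pvIdxList (P : List (Int × Int)) (v : Int) : List Int :=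
  (P.filter (fun p => p.2 == v)).map (fun p => p.1)

-- loop invariant tying A's remaining list (= P.map (·.2), P its remaining (index, value) pairs
-- in index order) to B's state (vals, idxs)
def pvInv (P : List (Int × Int)) (vals : List Int) (idxs : PySem.Dict Int (List Int)) : Prop :=
  P.Pairwise (fun p q => p.1 < q.1) ∧
  vals.Pairwise (· < ·) ∧
  (∀ v, v ∈ vals ↔ v ∈ P.map (fun p => p.2)) ∧
  (∀ v, idxs.get? v = if pvIdxList P v = [] then none else some (pvIdxList P v))

lemma pvGet?_erase {ν : Type} (d : PySem.Dict Int ν) (k v : Int) :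
    (d.erase k).get? v = if v = k then none else d.get? v := by
  obtain ⟨items⟩ := d
  induction items with
  | nil => simp [PySem.Dict.erase, PySem.Dict.get?]
  | cons p tl ih =>
    simp only [PySem.Dict.erase, PySem.Dict.get?, List.filter_cons] at *
    by_cases hv : v = k
    · subst hv
      by_cases hp : p.1 = v <;> simp_all [List.find?_cons, beq_iff_eq, hp]
    · by_cases hp : p.1 = v
      · have : ¬ (p.1 = k) := by rw [hp]; exact hv
        simp [List.find?_cons, this, hp, hv]
      · by_cases hpk : p.1 = k <;> simp_all [List.find?_cons, beq_iff_eq]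

lemma pvIdxList_append (P1 P2 : List (Int × Int)) (v : Int) :
    pvIdxList (P1 ++ P2) v = pvIdxList P1 v ++ pvIdxList P2 v := by
  simp [pvIdxList]

lemma pvIdxList_nil_iff (P : List (Int × Int)) (v : Int) :
    pvIdxList P v = [] ↔ v ∉ P.map (fun p => p.2) := by
  simp only [pvIdxList, List.map_eq_nil_iff, List.filter_eq_nil_iff, List.mem_map]
  constructor
  · rintro h ⟨p, hp, hv⟩
    exact absurd (by simp [hv] : (p.2 == v) = true) (by simpa using h p hp)
  · intro h p hp
    simp only [beq_iff_eq]
    intro hv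
    exact h ⟨p, hp, hv⟩

-- first-wins combination of the head with the min of the tail
def pvStep (x : Int) (o : Option Int) (key : Int → Int) : Int :=
  match o with
  | none => x
  | some b => if key b < key x then b else x

lemma pvMin?_cons (x : Int) (l : List Int) (key : Int → Int) :
    PySem.List.min? (x :: l) key = some (pvStep x (PySem.List.min? l key) key) := by
  induction l generalizing x with
  | nil => simp [PySem.List.min?, pvStep]
  | cons y tl ih =>
    have hstep : PySem.List.min? (x :: y :: tl) key
        = PySem.List.min? ((if key y < key x then y else x) :: tl) key := by
      unfold PySem.List.min?
      simp only [List.foldl_cons]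
      by_cases h : key y < key x <;> simp [h]
    rw [hstep, ih, ih]
    rcases h : PySem.List.min? tl key with _ | b <;>
      simp only [h, pvStep] <;>
      first | rfl | (split_ifs <;> first | rfl | omega)

lemma pvMin?_cons_keep (l : List Int) (a : Int) (key : Int → Int)
    (h : ∀ y ∈ l, key a ≤ key y) :
    PySem.List.min? (a :: l) key = some a := by
  rw [pvMin?_cons]
  rcases hm : PySem.List.min? l key with _ | b
  · rfl
  · have := h b (PySem.List.min?_mem hm)
    simp only [pvStep]
    congr 1
    rw [if_neg (by omega)]


lemma pvMin?_first (pre suf : List Int) (m : Int) (key : Int → Int)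
    (hpre : ∀ y ∈ pre, key m < key y) (hsuf : ∀ y ∈ suf, key m ≤ key y) :
    PySem.List.min? (pre ++ m :: suf) key = some m := by
  induction pre with
  | nil => exact pvMin?_cons_keep suf m key hsuf
  | cons p ptl ih =>
    have ih' := ih (fun y hy => hpre y (by simp [hy]))
    rw [List.cons_append, pvMin?_cons, ih']
    have hp := hpre p (by simp)
    simp only [pvStep]
    rw [if_pos hp]

lemma pvFirstOcc (P : List (Int × Int)) (c : Int) (h : c ∈ P.map (fun p => p.2)) :
    ∃ P1 p P2, P = P1 ++ p :: P2 ∧ p.2 = c ∧ ∀ q ∈ P1, q.2 ≠ c := by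
  induction P with
  | nil => simp at h
  | cons p tl ih =>
    by_cases hp : p.2 = c
    · exact ⟨[], p, tl, by simp, hp, by simp⟩
    · have : c ∈ tl.map (fun p => p.2) := by
        rcases (by simpa using h) with h1 | h1
        · exact absurd h1.symm hp
        · simpa using h1
      obtain ⟨P1, q, P2, h1, h2, h3⟩ := ih this
      exact ⟨p :: P1, q, P2, by simp [h1], h2, by
        intro r hr
        rcases (by simpa using hr) with rfl | hr'
        · exact hp
        · exact h3 r hr'⟩

lemma pvFirstIdx_le (P : List (Int × Int)) (q : Int × Int)
    (hP : P.Pairwise (fun p q => p.1 < q.1)) (hq : q ∈ P) :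
    ∃ i tl, pvIdxList P q.2 = i :: tl ∧ i ≤ q.1 := by
  induction P with
  | nil => simp at hq
  | cons p tl ih =>
    rcases List.mem_cons.mp hq with rfl | hq'
    · exact ⟨q.1, pvIdxList tl q.2, by simp [pvIdxList], le_refl _⟩
    · have hlt : p.1 < q.1 := (List.pairwise_cons.mp hP).1 q hq'
      by_cases hp : p.2 = q.2
      · exact ⟨p.1, pvIdxList tl q.2, by simp [pvIdxList, hp], le_of_lt hlt⟩
      · obtain ⟨i, tl', h1, h2⟩ := ih (List.pairwise_cons.mp hP).2 hq'
        refine ⟨i, tl', ?_, h2⟩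
        simpa [pvIdxList, fun h => hp (by simpa using h)] using h1

lemma pvVals_mono (vals : List Int) (h : vals.Pairwise (· < ·)) {k1 k2 : Nat}
    (hk : k1 ≤ k2) (h2 : k2 < vals.length) : vals[k1]'(lt_of_le_of_lt hk h2) ≤ vals[k2] := by
  rcases eq_or_lt_of_le hk with rfl | hlt
  · exact le_refl _
  · exact le_of_lt (List.pairwise_iff_getElem.mp h k1 k2 _ h2 hlt)

lemma pvIdxHead_mem (P : List (Int × Int)) (v i : Int) (tl : List Int)
    (h : pvIdxList P v = i :: tl) : (i, v) ∈ P := by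
  have : i ∈ pvIdxList P v := by rw [h]; simp
  obtain ⟨p, hp, hpi⟩ := List.mem_map.mp this
  have hpv := List.mem_filter.mp hp
  have : p = (i, v) := by
    obtain ⟨p1, p2⟩ := p
    simp only [beq_iff_eq] at hpv
    simp only at hpi
    simp [hpi, hpv.2]
  rw [← this]; exact hpv.1

lemma pvFst_inj (P : List (Int × Int)) (hP : P.Pairwise (fun p q => p.1 < q.1))
    {i a b : Int} (ha : (i, a) ∈ P) (hb : (i, b) ∈ P) : a = b := by
  by_contra hne
  have hpq : ((i, a) : Int × Int) ≠ (i, b) := by simp [hne]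
  obtain ⟨k1, hk1, h1⟩ := List.mem_iff_getElem.mp ha
  obtain ⟨k2, hk2, h2⟩ := List.mem_iff_getElem.mp hb
  have hkk : k1 ≠ k2 := by intro h; subst h; rw [h1] at h2; exact hpq (by rw [h2])
  have hmono := List.pairwise_iff_getElem.mp hP
  rcases Nat.lt_or_ge k1 k2 with h | h
  · have := hmono k1 k2 hk1 hk2 h; rw [h1, h2] at this; simp at this
  · have hlt : k2 < k1 := by omega
    have := hmono k2 k1 hk2 hk1 hlt
    rw [h1, h2] at this; simp at this

-- erasing a member of a strictly sorted list at its bisect position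
lemma pvEraseSorted (vals : List Int) (cand : Int) (h : vals.Pairwise (· < ·))
    (hc : cand ∈ vals) :
    (vals.eraseIdx (PySem.List.bisectLeft vals cand)).Pairwise (· < ·) ∧
    (∀ v, v ∈ vals.eraseIdx (PySem.List.bisectLeft vals cand) ↔ v ∈ vals ∧ v ≠ cand) := by
  have hle : vals.Pairwise (· ≤ ·) := h.imp le_of_lt
  obtain ⟨hjlen, hlt, hge⟩ := PySem.List.bisectLeft_spec vals cand hle
  set j := PySem.List.bisectLeft vals cand with hj
  obtain ⟨k, hk, hkv⟩ := List.mem_iff_getElem.mp hc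
  have hjk : j ≤ k := by
    by_contra hjk
    have := hlt k hk (by omega)
    omega
  have hjlt : j < vals.length := lt_of_le_of_lt hjk hk
  have hvj : vals[j] = cand := by
    have h1 := hge j hjlt (le_refl j)
    have h2 := pvVals_mono vals h hjk hk
    omega
  constructor
  · exact h.sublist (List.eraseIdx_sublist vals j)
  · intro v
    rw [List.eraseIdx_eq_take_drop_succ]
    constructor
    · intro hv
      rcases List.mem_append.mp hv with hv | hv
      · obtain ⟨i, hi, hiv⟩ := List.mem_take_iff_getElem.mp hv
        have hij : i < j := by omega
        have hlt : vals[i]'(by omega) < vals[j] := List.pairwise_iff_getElem.mp h i j (by omega) hjlt hij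
        refine ⟨by rw [← hiv]; exact List.getElem_mem _, ?_⟩
        rw [← hiv]; rw [hvj] at hlt; omega
      · obtain ⟨i, hi, hiv⟩ := List.mem_drop_iff_getElem.mp hv
        have hlt : vals[j] < vals[j+1+i]'(by omega) := List.pairwise_iff_getElem.mp h j (j+1+i) hjlt (by omega) (by omega)
        refine ⟨by rw [← hiv]; exact List.getElem_mem _, ?_⟩
        rw [← hiv]; rw [hvj] at hlt; omega
    · rintro ⟨hv, hvne⟩
      obtain ⟨i, hi, hiv⟩ := List.mem_iff_getElem.mp hv
      have hij : i ≠ j := by intro hh; subst hh; rw [hvj] at hiv; exact hvne hiv.symm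
      rcases Nat.lt_or_ge i j with hh | hh
      · exact List.mem_append.mpr (Or.inl (List.mem_take_iff_getElem.mpr ⟨i, by omega, hiv⟩))
      · have hij' : j + 1 ≤ i := by omega
        refine List.mem_append.mpr (Or.inr (List.mem_drop_iff_getElem.mpr ⟨i - (j+1), by omega, ?_⟩))
        have : j + 1 + (i - (j+1)) = i := by omega
        simp only [this]
        exact hiv

-- from "cand is an argmin with strictly smallest first index among tying values" to
-- the conclusion of the selection step
lemma pvSelect_of_argmin (P : List (Int × Int)) (vals : List Int)
    (idxs : PySem.Dict Int (List Int)) (t c : Int) (hInv : pvInv P vals idxs)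
    (hc : c ∈ vals)
    (hmin : ∀ v ∈ vals, |c - t| ≤ |v - t|)
    (htie : ∀ v ∈ vals, v ≠ c → |v - t| = |c - t| →
      ∀ i tlc i' tl', pvIdxList P c = i :: tlc → pvIdxList P v = i' :: tl' → i < i') :
    ∃ P1 p P2, P = P1 ++ p :: P2 ∧ p.2 = c ∧ (∀ q ∈ P1, q.2 ≠ c) ∧
      PySem.List.min? (P.map (fun x => x.2)) (fun x => |x - t|) = some c := by
  obtain ⟨hPidx, hvals, hmem, hidx⟩ := hInv
  have hcP : c ∈ P.map (fun p => p.2) := (hmem c).mp hc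
  obtain ⟨P1, p, P2, hPeq, hpc, hP1⟩ := pvFirstOcc P c hcP
  refine ⟨P1, p, P2, hPeq, hpc, hP1, ?_⟩
  have hmap : P.map (fun x => x.2) = P1.map (fun x => x.2) ++ p.2 :: P2.map (fun x => x.2) := by
    rw [hPeq]; simp
  rw [hmap, hpc]
  apply pvMin?_first
  · -- strict on the prefix
    intro y hy
    obtain ⟨q, hq, hqy⟩ := List.mem_map.mp hy
    have hyv : y ∈ vals := (hmem y).mpr (by rw [hPeq]; exact List.mem_map.mpr ⟨q, by simp [hq], hqy⟩)
    have hyne : y ≠ c := by rw [← hqy]; exact hP1 q hq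
    have hle := hmin y hyv
    rcases lt_or_eq_of_le hle with hlt | heq
    · exact hlt
    · exfalso
      -- tie: compare first indices
      have hclist : pvIdxList P c = p.1 :: pvIdxList P2 c := by
        rw [hPeq, ← List.singleton_append, ← List.append_assoc, pvIdxList_append, pvIdxList_append]
        have h1 : pvIdxList P1 c = [] := (pvIdxList_nil_iff P1 c).mpr (by
          intro hmem1
          obtain ⟨q', hq', hq'c⟩ := List.mem_map.mp hmem1
          exact hP1 q' hq' hq'c)
        rw [h1]
        simp [pvIdxList, hpc]
      obtain ⟨i', tl', hylist, hi'q⟩ := by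
        have := pvFirstIdx_le P q hPidx (by rw [hPeq]; simp [hq])
        rwa [hqy] at this
      have := htie y hyv hyne heq.symm p.1 (pvIdxList P2 c) i' tl' hclist hylist
      -- but q sits before p in P, so q.1 < p.1 while the first y-index is ≤ q.1
      have hqp : q.1 < p.1 := by
        have := List.pairwise_append.mp (by rw [← hPeq]; exact hPidx)
        exact this.2.2 q hq p (by simp)
      omega
  · intro y hy
    obtain ⟨q, hq, hqy⟩ := List.mem_map.mp hy
    exact hmin y ((hmem y).mpr (by rw [hPeq]; exact List.mem_map.mpr ⟨q, by simp [hq], hqy⟩))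

-- the selection step: B's bisect candidate is exactly the value of the first pair of P that
-- Python's min(preds, key=|x-t|) selects
lemma pvSelect (P : List (Int × Int)) (vals : List Int) (idxs : PySem.Dict Int (List Int))
    (t : Int) (hInv : pvInv P vals idxs) (hP : P ≠ []) :
    ∃ P1 p P2, P = P1 ++ p :: P2 ∧ p.2 = pvCand vals idxs t ∧ (∀ q ∈ P1, q.2 ≠ p.2) ∧
      PySem.List.min? (P.map (fun x => x.2)) (fun x => |x - t|) = some (pvCand vals idxs t) := by
  have hPidx := hInv.1
  have hvals := hInv.2.1
  have hmem := hInv.2.2.1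
  have hidx := hInv.2.2.2
  have hle : vals.Pairwise (· ≤ ·) := hvals.imp le_of_lt
  obtain ⟨hjlen, hblt, hbge⟩ := PySem.List.bisectLeft_spec vals t hle
  obtain ⟨p0, hp0⟩ : ∃ p0, p0 ∈ P := by
    cases P with
    | nil => exact absurd rfl hP
    | cons a l => exact ⟨a, by simp⟩
  have hvne : vals ≠ [] := List.ne_nil_of_mem ((hmem p0.2).mpr (List.mem_map.mpr ⟨p0, hp0, rfl⟩))
  have hn : 0 < vals.length := List.length_pos_iff.mpr hvne
  have habsle : ∀ a : Int, a ≤ t → |a - t| = t - a := by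
    intro a ha; rw [abs_sub_comm]; exact abs_of_nonneg (by omega)
  have habsge : ∀ a : Int, t ≤ a → |a - t| = a - t := by
    intro a ha; exact abs_of_nonneg (by omega)
  have hgoal : ∀ c : Int, pvCand vals idxs t = c → c ∈ vals →
      (∀ v ∈ vals, |c - t| ≤ |v - t|) →
      (∀ v ∈ vals, v ≠ c → |v - t| = |c - t| →
        ∀ i tlc i' tl', pvIdxList P c = i :: tlc → pvIdxList P v = i' :: tl' → i < i') →
      ∃ P1 p P2, P = P1 ++ p :: P2 ∧ p.2 = pvCand vals idxs t ∧ (∀ q ∈ P1, q.2 ≠ p.2) ∧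
        PySem.List.min? (P.map (fun x => x.2)) (fun x => |x - t|) = some (pvCand vals idxs t) := by
    intro c hc hcv hmin htie
    rw [hc]
    obtain ⟨P1, p, P2, h1, h2, h3, h4⟩ := pvSelect_of_argmin P vals idxs t c hInv hcv hmin htie
    exact ⟨P1, p, P2, h1, h2, by rw [h2]; exact h3, h4⟩
  by_cases hj0 : PySem.List.bisectLeft vals t = 0
  · -- j = 0 : every value is ≥ t and vals[0] is the unique closest
    have hcand : pvCand vals idxs t = vals[0] := by
      simp only [pvCand, hj0, if_pos rfl]
      exact List.getD_eq_getElem vals 0 hn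
    refine hgoal vals[0] hcand (List.getElem_mem hn) ?_ ?_
    · intro v hv
      obtain ⟨k, hk, hkv⟩ := List.mem_iff_getElem.mp hv
      have h0k : vals[0] ≤ vals[k] := pvVals_mono vals hvals (Nat.zero_le k) hk
      have ht0 : t ≤ vals[0] := hbge 0 hn (by omega)
      have htk : t ≤ vals[k] := hbge k hk (by omega)
      rw [← hkv, habsge _ ht0, habsge _ htk]; omega
    · intro v hv hne heq i tlc i' tl' hl1 hl2
      exfalso
      obtain ⟨k, hk, hkv⟩ := List.mem_iff_getElem.mp hv
      have hk0 : k ≠ 0 := by intro h; subst h; exact hne hkv.symm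
      have hlt0 : vals[0] < vals[k] := List.pairwise_iff_getElem.mp hvals 0 k hn hk (by omega)
      have ht0 : t ≤ vals[0] := hbge 0 hn (by omega)
      have htk : t ≤ vals[k] := hbge k hk (by omega)
      rw [← hkv, habsge _ htk, habsge _ ht0] at heq
      omega
  · by_cases hjn : PySem.List.bisectLeft vals t = vals.length
    · -- j = len : every value is < t and the last value is the unique closest
      have hlast : vals.length - 1 < vals.length := by omega
      have hcand : pvCand vals idxs t = vals[vals.length - 1] := by
        simp only [pvCand]
        rw [if_neg hj0, if_pos hjn]
        exact List.getD_eq_getElem vals 0 hlast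
      refine hgoal _ hcand (List.getElem_mem hlast) ?_ ?_
      · intro v hv
        obtain ⟨k, hk, hkv⟩ := List.mem_iff_getElem.mp hv
        have hkn : vals[k] ≤ vals[vals.length - 1] := pvVals_mono vals hvals (by omega) hlast
        have hlt1 : vals[vals.length - 1] < t := hblt _ hlast (by omega)
        have hltk : vals[k] < t := hblt k hk (by omega)
        rw [← hkv, habsle _ (by omega), habsle _ (by omega)]; omega
      · intro v hv hne heq i tlc i' tl' hl1 hl2
        exfalso
        obtain ⟨k, hk, hkv⟩ := List.mem_iff_getElem.mp hv
        have hkn : k ≠ vals.length - 1 := by intro h; subst h; exact hne hkv.symm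
        have hlt0 : vals[k] < vals[vals.length - 1] :=
          List.pairwise_iff_getElem.mp hvals k (vals.length - 1) hk hlast (by omega)
        have hlt1 : vals[vals.length - 1] < t := hblt _ hlast (by omega)
        rw [← hkv, habsle _ (by omega), habsle _ (by omega)] at heq
        omega
    · -- interior : the two bisect neighbours are the only candidates
      have hjpos : 0 < PySem.List.bisectLeft vals t := Nat.pos_of_ne_zero hj0
      have hjlt : PySem.List.bisectLeft vals t < vals.length := by omega
      set j := PySem.List.bisectLeft vals t with hj
      have hj1 : j - 1 < vals.length := by omega
      have hlo_t : vals[j-1] < t := hblt (j-1) hj1 (by omega)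
      have hhi_t : t ≤ vals[j] := hbge j hjlt (le_refl j)
      have hlohi : vals[j-1] < vals[j] := List.pairwise_iff_getElem.mp hvals (j-1) j hj1 hjlt (by omega)
      -- the head indices stored in the dict
      have hmemlo : vals[j-1] ∈ vals := List.getElem_mem hj1
      have hmemhi : vals[j] ∈ vals := List.getElem_mem hjlt
      obtain ⟨ilo, tllo, hlolist⟩ : ∃ i tl, pvIdxList P vals[j-1] = i :: tl := by
        rcases h : pvIdxList P vals[j-1] with _ | ⟨i, tl⟩
        · exact absurd ((pvIdxList_nil_iff _ _).mp h) (by simp [(hmem _).mp hmemlo])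
        · exact ⟨i, tl, rfl⟩
      obtain ⟨ihi, tlhi, hhilist⟩ : ∃ i tl, pvIdxList P vals[j] = i :: tl := by
        rcases h : pvIdxList P vals[j] with _ | ⟨i, tl⟩
        · exact absurd ((pvIdxList_nil_iff _ _).mp h) (by simp [(hmem _).mp hmemhi])
        · exact ⟨i, tl, rfl⟩
      have hheadlo : ((idxs.get? vals[j-1]).getD []).getD 0 0 = ilo := by
        rw [hidx, hlolist]; simp
      have hheadhi : ((idxs.get? vals[j]).getD []).getD 0 0 = ihi := by
        rw [hidx, hhilist]; simp
      have hne_idx : ilo ≠ ihi := by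
        intro h
        have h1 := pvIdxHead_mem P vals[j-1] ilo tllo hlolist
        have h2 := pvIdxHead_mem P vals[j] ihi tlhi hhilist
        rw [h] at h1
        exact absurd (pvFst_inj P hPidx h1 h2) (by omega)
      have hcand0 : pvCand vals idxs t =
          (if t - vals[j-1] < vals[j] - t ∨ (t - vals[j-1] = vals[j] - t ∧ ilo < ihi)
           then vals[j-1] else vals[j]) := by
        simp only [pvCand, ← hj, if_neg hj0, if_neg hjn]
        rw [List.getD_eq_getElem vals 0 hj1, List.getD_eq_getElem vals 0 hjlt, hheadlo, hheadhi]
      by_cases hcond : t - vals[j-1] < vals[j] - t ∨ (t - vals[j-1] = vals[j] - t ∧ ilo < ihi)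
      · -- candidate is the left neighbour
        have hcand : pvCand vals idxs t = vals[j-1] := by rw [hcand0, if_pos hcond]
        have hd : t - vals[j-1] ≤ vals[j] - t := by rcases hcond with h | h <;> omega
        refine hgoal _ hcand hmemlo ?_ ?_
        · intro v hv
          obtain ⟨k, hk, hkv⟩ := List.mem_iff_getElem.mp hv
          rcases Nat.lt_or_ge k j with hkj | hkj
          · have hA : vals[k] ≤ vals[j-1] := pvVals_mono vals hvals (by omega) hj1
            have hB : vals[k] < t := hblt k hk hkj
            rw [← hkv, habsle _ (by omega), habsle _ (by omega)]; omega
          · have hA : vals[j] ≤ vals[k] := pvVals_mono vals hvals hkj hk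
            have hB : t ≤ vals[k] := by omega
            rw [← hkv, habsle _ (by omega), habsge _ (by omega)]; omega
        · intro v hv hne heq i tlc i' tl' hl1 hl2
          obtain ⟨k, hk, hkv⟩ := List.mem_iff_getElem.mp hv
          rcases Nat.lt_or_ge k j with hkj | hkj
          · exfalso
            have hkj1 : k ≠ j - 1 := by intro h; subst h; exact hne hkv.symm
            have h1 : vals[k] < vals[j-1] :=
              List.pairwise_iff_getElem.mp hvals k (j-1) hk hj1 (by omega)
            have h2 : vals[k] < t := hblt k hk hkj
            rw [← hkv, habsle _ (by omega), habsle _ (by omega)] at heq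
            omega
          · -- v must be the right neighbour, and we are in the tie case
            have h1 : vals[j] ≤ vals[k] := pvVals_mono vals hvals hkj hk
            have h2 : t ≤ vals[k] := by omega
            rw [← hkv, habsge _ (by omega), habsle _ (by omega)] at heq
            have hvhi : vals[k] = vals[j] := by omega
            have htiec : t - vals[j-1] = vals[j] - t ∧ ilo < ihi := by
              rcases hcond with h | h
              · exfalso; omega
              · exact h
            rw [hlolist] at hl1
            rw [← hkv, hvhi, hhilist] at hl2
            have hi1 : ilo = i := (List.cons.inj hl1).1
            have hi2 : ihi = i' := (List.cons.inj hl2).1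
            rw [← hi1, ← hi2]
            exact htiec.2
      · -- candidate is the right neighbour
        have hcand : pvCand vals idxs t = vals[j] := by rw [hcand0, if_neg hcond]
        push_neg at hcond
        have hd : vals[j] - t ≤ t - vals[j-1] := by omega
        refine hgoal _ hcand hmemhi ?_ ?_
        · intro v hv
          obtain ⟨k, hk, hkv⟩ := List.mem_iff_getElem.mp hv
          rcases Nat.lt_or_ge k j with hkj | hkj
          · have hA : vals[k] ≤ vals[j-1] := pvVals_mono vals hvals (by omega) hj1
            have hB : vals[k] < t := hblt k hk hkj
            rw [← hkv, habsge _ (by omega), habsle _ (by omega)]; omega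
          · have hA : vals[j] ≤ vals[k] := pvVals_mono vals hvals hkj hk
            rw [← hkv, habsge _ (by omega), habsge _ (by omega)]; omega
        · intro v hv hne heq i tlc i' tl' hl1 hl2
          obtain ⟨k, hk, hkv⟩ := List.mem_iff_getElem.mp hv
          rcases Nat.lt_or_ge k j with hkj | hkj
          · -- v must be the left neighbour, in a tie, with the smaller head on the right
            have h1 : vals[k] ≤ vals[j-1] := pvVals_mono vals hvals (by omega) hj1
            have h2 : vals[k] < t := hblt k hk hkj
            rw [← hkv, habsle _ (by omega), habsge _ (by omega)] at heq
            have hvlo : vals[k] = vals[j-1] := by omega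
            have htieeq : t - vals[j-1] = vals[j] - t := by omega
            have hii : ihi < ilo := by
              have := hcond.2 htieeq
              omega
            rw [hhilist] at hl1
            rw [← hkv, hvlo, hlolist] at hl2
            have hi1 : ihi = i := (List.cons.inj hl1).1
            have hi2 : ilo = i' := (List.cons.inj hl2).1
            rw [← hi1, ← hi2]
            exact hii
          · exfalso
            have hkj1 : k ≠ j := by intro h; subst h; exact hne hkv.symm
            have h1 : vals[j] < vals[k] :=
              List.pairwise_iff_getElem.mp hvals j k hjlt hk (by omega)
            rw [← hkv, habsge _ (by omega), habsge _ (by omega)] at heq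
            omega

-- one loop step preserves the invariant and both loops compute the same output
lemma pvLoop_eq (trues : List Int) (P : List (Int × Int)) (vals : List Int)
    (idxs : PySem.Dict Int (List Int)) (acc : List (Int × Int))
    (hInv : pvInv P vals idxs) :
    pvLoopA trues acc (P.map (fun p => p.2)) = pvLoopB trues vals idxs acc := by
  induction trues generalizing P vals idxs acc with
  | nil => rfl
  | cons t ts ih =>
    have hPidx := hInv.1
    have hvals := hInv.2.1
    have hmem := hInv.2.2.1
    have hidx := hInv.2.2.2
    by_cases hP : P = []
    · subst hP
      have hv : vals = [] := List.eq_nil_iff_forall_not_mem.mpr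
        (fun v hv => by simpa using (hmem v).mp hv)
      simp [pvLoopA, pvLoopB, hv]
    · obtain ⟨B, pm, C, hPeq, hpc, hfirst, hmin⟩ := pvSelect P vals idxs t hInv hP
      set cand := pvCand vals idxs t with hcand
      have hvne : vals ≠ [] := by
        obtain ⟨q, hq⟩ : ∃ q, q ∈ P := by
          cases P with
          | nil => exact absurd rfl hP
          | cons a l => exact ⟨a, by simp⟩
        exact List.ne_nil_of_mem ((hmem q.2).mpr (List.mem_map.mpr ⟨q, hq, rfl⟩))
      have hcv : cand ∈ vals := by
        rw [← hpc]
        exact (hmem pm.2).mpr (List.mem_map.mpr ⟨pm, by rw [hPeq]; simp, rfl⟩)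
      have hcin : cand ∈ P.map (fun p => p.2) := (hmem cand).mp hcv
      have hnotin : cand ∉ B.map (fun p => p.2) := by
        intro h
        obtain ⟨q, hq, hq2⟩ := List.mem_map.mp h
        exact (hfirst q hq) (by rw [hq2, hpc])
      have hlen : ¬ ((P.map (fun p => p.2)).length = 0) := by
        simp only [List.length_map]
        intro h
        exact hP (List.length_eq_zero_iff.mp h)
      -- A's next remaining list
      have hremove : (PySem.List.remove? (P.map (fun p => p.2)) cand).getD (P.map (fun p => p.2))
          = (B ++ C).map (fun p => p.2) := by
        rw [PySem.List.remove?_eq_some_erase _ cand hcin]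
        simp only [Option.getD_some]
        rw [hPeq, List.map_append, List.erase_append_right _ hnotin, List.map_cons, hpc,
          List.erase_cons_head, ← List.map_append]
      -- B's queue for cand
      have hBnil : pvIdxList B cand = [] := (pvIdxList_nil_iff B cand).mpr hnotin
      have hclist : pvIdxList P cand = pm.1 :: pvIdxList C cand := by
        rw [hPeq, ← List.singleton_append, ← List.append_assoc, pvIdxList_append,
          pvIdxList_append, hBnil]
        simp [pvIdxList, hpc]
      have hrem : (idxs.get? cand).getD [] = pm.1 :: pvIdxList C cand := by
        rw [hidx cand, if_neg (by rw [hclist]; simp)]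
        simp [hclist]
      have hP'cand : pvIdxList (B ++ C) cand = pvIdxList C cand := by
        rw [pvIdxList_append, hBnil, List.nil_append]
      have hIdxEq : ∀ v, v ≠ cand → pvIdxList (B ++ C) v = pvIdxList P v := by
        intro v hv
        have hne : (pm.2 == v) = false := by
          rw [hpc]; exact beq_eq_false_iff_ne.mpr (Ne.symm hv)
        rw [hPeq, pvIdxList_append, pvIdxList_append]
        congr 1
        simp [pvIdxList, List.filter_cons, hne]
      -- membership in the new pair list
      have hmem' : ∀ v, v ∈ (B ++ C).map (fun p => p.2) ↔
          (v ∈ P.map (fun p => p.2) ∧ (v = cand → pvIdxList C cand ≠ [])) := by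
        intro v
        constructor
        · intro hv
          obtain ⟨q, hq, hq2⟩ := List.mem_map.mp hv
          have hqP : q ∈ P := by
            rw [hPeq]
            rcases List.mem_append.mp hq with h | h
            · exact List.mem_append.mpr (Or.inl h)
            · exact List.mem_append.mpr (Or.inr (List.mem_cons_of_mem _ h))
          refine ⟨List.mem_map.mpr ⟨q, hqP, hq2⟩, ?_⟩
          intro hvc hnil
          rcases List.mem_append.mp hq with h | h
          · exact hnotin (List.mem_map.mpr ⟨q, h, by rw [hq2, hvc]⟩)
          · exact (pvIdxList_nil_iff C cand).mp hnil
              (List.mem_map.mpr ⟨q, h, by rw [hq2, hvc]⟩)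
        · rintro ⟨hv, hvc⟩
          obtain ⟨q, hq, hq2⟩ := List.mem_map.mp hv
          rw [hPeq] at hq
          rcases List.mem_append.mp hq with h | h
          · exact List.mem_map.mpr ⟨q, List.mem_append.mpr (Or.inl h), hq2⟩
          · rcases List.mem_cons.mp h with rfl | h
            · -- q = pm : v = cand, so the right queue is nonempty and cand is still present
              have hvc' := hvc (by rw [← hq2, hpc])
              have : cand ∈ C.map (fun p => p.2) := by
                rcases hcl : pvIdxList C cand with _ | ⟨i, tl⟩
                · exact absurd hcl hvc'
                · have := pvIdxHead_mem C cand i tl hcl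
                  exact List.mem_map.mpr ⟨(i, cand), this, rfl⟩
              rw [← hq2, hpc]
              exact List.mem_map.mpr (by
                obtain ⟨q', hq', hq'2⟩ := List.mem_map.mp this
                exact ⟨q', List.mem_append.mpr (Or.inr hq'), hq'2⟩)
            · exact List.mem_map.mpr ⟨q, List.mem_append.mpr (Or.inr h), hq2⟩
      -- step A
      have hA : pvLoopA (t :: ts) acc (P.map (fun p => p.2))
          = pvLoopA ts (acc ++ [(t, cand)]) ((B ++ C).map (fun p => p.2)) := by
        simp only [pvLoopA]
        rw [if_neg hlen, hmin]
        show pvLoopA ts (acc ++ [(t, cand)])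
          ((PySem.List.remove? (P.map (fun p => p.2)) cand).getD (P.map (fun p => p.2))) = _
        rw [hremove]
      rw [hA]
      -- step B
      simp only [pvLoopB]
      rw [if_neg hvne, ← hcand, hrem]
      simp only [List.drop_succ_cons, List.drop_zero]
      by_cases hrem0 : pvIdxList C cand = []
      · rw [if_pos hrem0]
        apply ih
        obtain ⟨hp1, hp2⟩ := pvEraseSorted vals cand hvals hcv
        refine ⟨hPidx.sublist (by rw [hPeq]; exact (List.sublist_cons_self pm C).append_left B),
          hp1, ?_, ?_⟩
        · intro v
          rw [hp2 v, hmem' v]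
          constructor
          · rintro ⟨hv, hvne'⟩
            exact ⟨(hmem v).mp hv, fun h => absurd h hvne'⟩
          · rintro ⟨hv, hvc⟩
            have hvnec : v ≠ cand := by
              intro h
              exact (hvc h) hrem0
            exact ⟨(hmem v).mpr hv, hvnec⟩
        · intro v
          rw [pvGet?_erase]
          by_cases hv : v = cand
          · subst hv
            rw [if_pos rfl, hP'cand, hrem0, if_pos rfl]
          · rw [if_neg hv, hidx v, hIdxEq v hv]
      · rw [if_neg hrem0]
        apply ih
        refine ⟨hPidx.sublist (by rw [hPeq]; exact (List.sublist_cons_self pm C).append_left B),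
          hvals, ?_, ?_⟩
        · intro v
          rw [hmem' v]
          constructor
          · intro hv
            exact ⟨(hmem v).mp hv, fun _ => hrem0⟩
          · rintro ⟨hv, _⟩
            exact (hmem v).mpr hv
        · intro v
          by_cases hv : v = cand
          · subst hv
            rw [PySem.Dict.get?_insert_self, hP'cand, if_neg hrem0]
          · rw [PySem.Dict.get?_insert_of_ne _ _ hv, hidx v, hIdxEq v hv]

-- building the index dictionary: the fold satisfies its specification relative to the
-- already-processed prefix L
lemma pvBuild_go (E : List (Int × Int)) (L : List (Int × Int)) (d : PySem.Dict Int (List Int))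
    (hd : ∀ v, d.get? v = if pvIdxList L v = [] then none else some (pvIdxList L v)) :
    ∀ v, (E.foldl (fun d p => d.insert p.2 (((d.get? p.2).getD []) ++ [p.1])) d).get? v
      = if pvIdxList (L ++ E) v = [] then none else some (pvIdxList (L ++ E) v) := by
  induction E generalizing L d with
  | nil => intro v; simpa using hd v
  | cons p E' ih =>
    intro v
    have hstep : ∀ w, (d.insert p.2 (((d.get? p.2).getD []) ++ [p.1])).get? w
        = if pvIdxList (L ++ [p]) w = [] then none else some (pvIdxList (L ++ [p]) w) := by
      intro w
      by_cases hw : w = p.2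
      · rw [hw, PySem.Dict.get?_insert_self]
        have hold : (d.get? p.2).getD [] = pvIdxList L p.2 := by
          rw [hd p.2]
          by_cases h : pvIdxList L p.2 = [] <;> simp [h]
        rw [hold]
        have hl : pvIdxList (L ++ [p]) p.2 = pvIdxList L p.2 ++ [p.1] := by
          rw [pvIdxList_append]
          simp [pvIdxList]
        rw [hl, if_neg (by simp)]
      · rw [PySem.Dict.get?_insert_of_ne _ _ hw, hd w]
        have hne : (p.2 == w) = false := beq_eq_false_iff_ne.mpr (Ne.symm hw)
        have hl : pvIdxList (L ++ [p]) w = pvIdxList L w := by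
          rw [pvIdxList_append]
          simp [pvIdxList, List.filter_cons, hne]
        rw [hl]
    have h := ih (L ++ [p]) _ hstep v
    rw [List.foldl_cons]
    rw [h, List.append_assoc, List.singleton_append]

lemma pvInit (preds : List Int) :
    pvInv (PySem.List.enumerate preds)
      (PySem.List.sorted (PySem.Set.ofList preds) (fun x => x)) (pvBuildIdxs preds) := by
  refine ⟨PySem.List.pairwise_lt_enumerate preds 0, PySem.List.sorted_ofList_pairwise_lt preds,
    ?_, ?_⟩
  · intro v
    rw [PySem.List.mem_sorted, PySem.Set.mem_ofList, PySem.List.map_snd_enumerate]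
  · intro v
    have h := pvBuild_go (PySem.List.enumerate preds) [] ∅
      (by intro w; simp [PySem.Dict.get?, pvIdxList, EmptyCollection.emptyCollection,
        PySem.Dict.empty]) v
    simpa [pvBuildIdxs] using h

lemma pvHalf (trues preds : List Int) :
    pvLoopA trues [] preds =
      pvLoopB trues (PySem.List.sorted (PySem.Set.ofList preds) (fun x => x)) (pvBuildIdxs preds) [] := by
  have h := pvLoop_eq trues (PySem.List.enumerate preds)
    (PySem.List.sorted (PySem.Set.ofList preds) (fun x => x)) (pvBuildIdxs preds) [] (pvInit preds)
  rwa [PySem.List.map_snd_enumerate] at h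

-- ===== VERDICT (by name: the statement is the Claim_ definition above) =====
theorem greedyMatchingAlgorithm_spec : Claim_equal_greedyMatchingAlgorithm := by
  intro a b c d _
  show _ = _
  unfold greedyMatchingAlgorithm greedyMatchingAlgorithm_alt
  rw [pvHalf a b, pvHalf c d]
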